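-- pv_equiv track=rewrite | github.com/ruchirK/python-differential | differential-collection.py | collection_min
-- ===== SOURCE A (Python) =====
-- from collections import defaultdict
--
-- def collection_consolidate(a):
--     consolidated = defaultdict(int)
--     for (data, diff) in a:
--         consolidated[data] += diff
--     return [(data, diff) for (data, diff) in consolidated.items() if diff != 0]
--
-- def collection_reduce(a, f):
--     keys = defaultdict(list)
--     out = []
--     for ((key, val), diff) in a:
--         keys[key].append((val, diff))
--     for (key, vals) in keys.items():
--         results = f(vals)
--         for (val, diff) in results:
--             out.append(((key, val), diff))
--     return collection_consolidate(out)
--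
-- def collection_min(a):
--     def min_inner(vals):
--         out = vals[0][0]
--         for (val, diff) in vals:
--             assert(diff > 0)
--             if val < out:
--                 out = val
--         return [(out, 1)]
--     return collection_reduce(a, min_inner)
-- ===== SOURCE B (Python) =====
-- def collection_min(a):
--     mins = {}
--     for ((key, val), diff) in a:
--         assert diff > 0
--         if key not in mins or val < mins[key]:
--             mins[key] = val
--     return [((key, val), 1) for (key, val) in mins.items()]
-- ===== Notes on version B (the rewrite author's own statement) =====
-- stated objective: simpler
-- what changed: Replaces the generic collection_reduce/collection_consolidate pipeline (build per-key value lists, scan each list for its minimum, then re-consolidate through a second dict) with one short streaming pass that keeps only a running minimum per key and emits the dict items directly.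
import Mathlib
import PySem

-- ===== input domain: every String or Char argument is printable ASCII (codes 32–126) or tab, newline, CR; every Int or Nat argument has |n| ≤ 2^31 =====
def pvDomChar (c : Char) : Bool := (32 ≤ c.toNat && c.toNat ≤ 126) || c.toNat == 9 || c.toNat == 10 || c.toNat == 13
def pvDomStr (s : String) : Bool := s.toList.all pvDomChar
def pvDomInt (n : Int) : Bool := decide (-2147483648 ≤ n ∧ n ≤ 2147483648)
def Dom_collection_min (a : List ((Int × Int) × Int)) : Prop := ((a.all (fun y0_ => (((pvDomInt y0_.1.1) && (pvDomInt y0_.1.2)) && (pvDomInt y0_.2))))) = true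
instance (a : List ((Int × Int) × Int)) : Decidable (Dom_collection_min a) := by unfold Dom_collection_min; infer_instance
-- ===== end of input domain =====

-- B replaces A's reduce/consolidate pipeline (per-key value lists, a min scan per list, then a second
-- consolidating dict pass) with a single pass keeping a running minimum per key; equivalence of return values on Pre_.


-- ===== PORT A =====
-- collection_consolidate
def pvConsolidate (a : List ((Int × Int) × Int)) : List ((Int × Int) × Int) :=
  let consolidated := a.foldl (fun (d : PySem.Dict (Int × Int) Int) p => d.insert p.1 (d.getD p.1 0 + p.2)) PySem.Dict.empty
  consolidated.items.filter (fun p => p.2 != 0)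

-- min_inner. Python's 'assert diff > 0' passes on every input Pre_ admits (Pre_ excludes the rest);
-- 'vals[0]' is an IndexError on [] in Python — unreachable, collection_reduce only calls f on nonempty groups; the port returns [] there.
def pvMinInner (vals : List (Int × Int)) : List (Int × Int) :=
  match PySem.List.pyGet? vals 0 with
  | none => []
  | some v0 => [(vals.foldl (fun out p => if p.1 < out then p.1 else out) v0.1, 1)]

-- collection_reduce
def pvReduce (a : List ((Int × Int) × Int)) (f : List (Int × Int) → List (Int × Int)) : List ((Int × Int) × Int) :=
  let keys := a.foldl (fun (d : PySem.Dict Int (List (Int × Int))) p => d.modify p.1.1 [] (· ++ [(p.1.2, p.2)])) PySem.Dict.empty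
  let out := keys.items.foldl (fun out kv => (f kv.2).foldl (fun out vd => out ++ [((kv.1, vd.1), vd.2)]) out) []
  pvConsolidate out

def collection_min (a : List ((Int × Int) × Int)) : List ((Int × Int) × Int) :=
  pvReduce a pvMinInner

-- ===== PORT B =====
-- one pass: key -> running minimum; Python's 'assert diff > 0' passes on every input Pre_ admits
def collection_min_alt (a : List ((Int × Int) × Int)) : List ((Int × Int) × Int) :=
  let mins := a.foldl (fun (d : PySem.Dict Int Int) p =>
      if d.contains p.1.1 = false then d.insert p.1.1 p.1.2
      else if p.1.2 < d.getD p.1.1 0 then d.insert p.1.1 p.1.2 else d)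
    PySem.Dict.empty
  mins.items.map (fun kv => ((kv.1, kv.2), 1))

-- ===== PRECONDITION & SPEC =====
-- Pre_ excludes inputs with some diff ≤ 0: there both Pythons raise the same bare AssertionError.
def Pre_collection_min (a : List ((Int × Int) × Int)) : Prop := ∀ p ∈ a, 0 < p.2
instance (a : List ((Int × Int) × Int)) : Decidable (Pre_collection_min a) := by unfold Pre_collection_min; infer_instance
def pvWitness_collection_min : (List ((Int × Int) × Int)) := [((1, 5), 1), ((1, 3), 2), ((2, 7), 1)]

def Spec_collection_min (a : List ((Int × Int) × Int)) (out : List ((Int × Int) × Int)) : Prop := out = collection_min_alt a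
instance (a : List ((Int × Int) × Int)) (out : List ((Int × Int) × Int)) : Decidable (Spec_collection_min a out) := by unfold Spec_collection_min; infer_instance

-- ===== CLAIM (what is proved, stated in full; the proofs are below) =====
def Claim_equal_collection_min : Prop := ∀ (a : List ((Int × Int) × Int)), Dom_collection_min a → Pre_collection_min a → Spec_collection_min a (collection_min a)

-- ===== LEMMAS AND PROOFS =====

-- B's per-element update seen through get?: a running minimum on an optional accumulator
def pvOptMin (o : Option Int) (v : Int) : Option Int :=
  match o with
  | none => some v
  | some m => some (if v < m then v else m)

-- B's loop body, named (collection_min_alt's fold function is definitionally pvBStep)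
def pvBStep (d : PySem.Dict Int Int) (p : (Int × Int) × Int) : PySem.Dict Int Int :=
  if d.contains p.1.1 = false then d.insert p.1.1 p.1.2
  else if p.1.2 < d.getD p.1.1 0 then d.insert p.1.1 p.1.2 else d

lemma bstep_get? (d : PySem.Dict Int Int) (p : (Int × Int) × Int) (k : Int) :
    (pvBStep d p).get? k = if p.1.1 == k then pvOptMin (d.get? k) p.1.2 else d.get? k := by
  unfold pvBStep
  by_cases hc : d.contains p.1.1 = false
  · simp only [hc, if_true]
    rcases eq_or_ne p.1.1 k with rfl | hne
    · have h0 : d.get? p.1.1 = none := (PySem.Dict.get?_eq_none_iff_contains d p.1.1).2 hc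
      simp [PySem.Dict.get?_insert_self, h0, pvOptMin]
    · simp [PySem.Dict.get?_insert_of_ne d p.1.2 (Ne.symm hne), hne]
  · have hc' : d.contains p.1.1 = true := by revert hc; cases d.contains p.1.1 <;> simp
    have hsome : ∃ m, d.get? p.1.1 = some m := by
      rw [PySem.Dict.contains_eq_isSome_get?] at hc'
      cases h : d.get? p.1.1 with
      | none => rw [h] at hc'; simp at hc'
      | some m => exact ⟨m, rfl⟩
    obtain ⟨m, hm⟩ := hsome
    have hgd : d.getD p.1.1 0 = m := PySem.Dict.getD_of_get?_eq_some d 0 hm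
    simp only [hc, hgd]
    rcases eq_or_ne p.1.1 k with rfl | hne
    · by_cases hlt : p.1.2 < m
      · simp [hlt, PySem.Dict.get?_insert_self, hm, pvOptMin]
      · simp [hlt, hm, pvOptMin]
    · by_cases hlt : p.1.2 < m
      · simp [hlt, PySem.Dict.get?_insert_of_ne d p.1.2 (Ne.symm hne), hne]
      · simp [hlt, hne]

lemma optMin_some (ws : List Int) (m : Int) :
    ws.foldl pvOptMin (some m) = some (ws.foldl (fun o v => if v < o then v else o) m) := by
  induction ws generalizing m with
  | nil => rfl
  | cons w ws ih => simp [List.foldl, pvOptMin, ih]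

lemma altFold_get? (a : List ((Int × Int) × Int)) (d : PySem.Dict Int Int) (k : Int) :
    (a.foldl pvBStep d).get? k =
      ((a.filter (fun p => p.1.1 == k)).map (fun p => p.1.2)).foldl pvOptMin (d.get? k) := by
  induction a generalizing d with
  | nil => rfl
  | cons p a ih =>
    simp only [List.foldl_cons, List.filter_cons]
    by_cases h : p.1.1 == k
    · simp only [h, if_true, List.map_cons, List.foldl_cons, ih, bstep_get?]
    · simp only [ih, bstep_get?, h]
      simp

lemma altFold_keys (a : List ((Int × Int) × Int)) (d : PySem.Dict Int Int) :
    (a.foldl pvBStep d).keys = PySem.Set.update d.keys (a.map (fun p => p.1.1)) := by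
  induction a generalizing d with
  | nil => rfl
  | cons p a ih =>
    simp only [List.foldl_cons, List.map_cons, PySem.Set.update_cons, ih]
    congr 1
    unfold pvBStep
    by_cases hc : d.contains p.1.1 = false
    · rw [if_pos hc, PySem.Dict.keys_insert_of_not_contains d p.1.2 hc,
        PySem.Set.add_of_not_mem (fun hmem => by
          rw [← PySem.Dict.contains_iff_mem_keys] at hmem; rw [hmem] at hc; cases hc)]
    · have hc' : d.contains p.1.1 = true := by revert hc; cases d.contains p.1.1 <;> simp
      have hmem : p.1.1 ∈ d.keys := (PySem.Dict.contains_iff_mem_keys d p.1.1).1 hc'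
      rw [if_neg hc, PySem.Set.add_of_mem hmem]
      split
      · exact PySem.Dict.keys_insert_of_contains d p.1.2 hc'
      · rfl

lemma consolidate_fold (l : List ((Int × Int) × Int)) (d : PySem.Dict (Int × Int) Int)
    (hn : (l.map (·.1)).Nodup) (hf : ∀ p ∈ l, d.contains p.1 = false) :
    (l.foldl (fun (d : PySem.Dict (Int × Int) Int) p => d.insert p.1 (d.getD p.1 0 + p.2)) d).items = d.items ++ l := by
  induction l generalizing d with
  | nil => simp
  | cons p l ih =>
    simp only [List.map_cons, List.nodup_cons] at hn
    have hfp : d.contains p.1 = false := hf p (by simp)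
    have hg : d.getD p.1 0 = 0 := PySem.Dict.getD_of_not_contains d 0 hfp
    simp only [List.foldl_cons, hg, zero_add]
    have hf' : ∀ q ∈ l, (d.insert p.1 p.2).contains q.1 = false := by
      intro q hq
      rw [PySem.Dict.contains_insert]
      have hne : q.1 ≠ p.1 := fun he => hn.1 (he ▸ List.mem_map_of_mem hq)
      simp [hne, hf q (List.mem_cons_of_mem _ hq)]
    rw [ih (d.insert p.1 p.2) hn.2 hf', PySem.Dict.items_insert_of_not_contains d _ hfp]
    simp

-- pvMinInner through the optional running minimum
lemma pvMinInner_eq (vs : List (Int × Int)) :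
    pvMinInner vs = ((vs.map (·.1)).foldl pvOptMin none).elim [] (fun m => [(m, 1)]) := by
  cases vs with
  | nil => rfl
  | cons v0 rest =>
    simp only [pvMinInner, PySem.List.pyGet?_zero_cons, List.map_cons, List.foldl_cons]
    have h1 : pvOptMin none v0.1 = some v0.1 := rfl
    rw [h1, optMin_some, List.foldl_map]
    simp only [Option.elim]
    congr 2
    simp

-- the reduce output loop as a flatMap
lemma out_fold (its : List (Int × List (Int × Int))) (acc : List ((Int × Int) × Int)) :
    its.foldl (fun out kv => (pvMinInner kv.2).foldl (fun out vd => out ++ [((kv.1, vd.1), vd.2)]) out) acc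
      = acc ++ its.flatMap (fun kv => (pvMinInner kv.2).map (fun vd => ((kv.1, vd.1), vd.2))) := by
  induction its generalizing acc with
  | nil => simp
  | cons kv its ih =>
    rw [List.foldl_cons, PySem.List.foldl_append_singleton_eq_map, ih]
    simp [List.flatMap_cons]

lemma flatMap_singleton_eq_map {α β : Type} (l : List α) (f : α → List β) (g : α → β)
    (h : ∀ x ∈ l, f x = [g x]) : l.flatMap f = l.map g := by
  induction l with
  | nil => rfl
  | cons x l ih =>
    simp only [List.flatMap_cons, List.map_cons, h x (by simp), ih (fun y hy => h y (by simp [hy]))]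
    rfl

lemma pv_main (a : List ((Int × Int) × Int)) : collection_min a = collection_min_alt a := by
  -- names
  set K := PySem.Set.ofList (a.map (fun p => p.1.1)) with hK
  have hKnodup : K.Nodup := PySem.Set.nodup_ofList _
  -- B side
  have halt : collection_min_alt a = (a.foldl pvBStep PySem.Dict.empty).items.map (fun kv => ((kv.1, kv.2), 1)) := rfl
  set mins := a.foldl pvBStep PySem.Dict.empty with hmins
  have hBkeys : mins.keys = K := by
    rw [hmins, altFold_keys, PySem.Dict.keys_empty, PySem.Set.update_nil_left, hK]
  have hBget : ∀ k, mins.get? k = ((a.filter (fun p => p.1.1 == k)).map (fun p => p.1.2)).foldl pvOptMin none := by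
    intro k; rw [hmins, altFold_get?, PySem.Dict.get?_empty]
  have hBitems : mins.items = K.map (fun k => (k, mins.getD k 0)) := by
    rw [PySem.Dict.items_eq_map_keys mins (hBkeys ▸ hKnodup) 0, hBkeys]
  have hBsome : ∀ k ∈ K, mins.get? k = some (mins.getD k 0) := by
    intro k hk
    have : mins.contains k = true := by rw [PySem.Dict.contains_iff_mem_keys, hBkeys]; exact hk
    rw [PySem.Dict.contains_eq_isSome_get?] at this
    cases h : mins.get? k with
    | none => rw [h] at this; simp at this
    | some m => rw [PySem.Dict.getD_of_get?_eq_some mins 0 h]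
  -- A side
  have hA : collection_min a = pvConsolidate
      ((a.foldl (fun (d : PySem.Dict Int (List (Int × Int))) p => d.modify p.1.1 [] (· ++ [(p.1.2, p.2)])) PySem.Dict.empty).items.foldl
        (fun out kv => (pvMinInner kv.2).foldl (fun out vd => out ++ [((kv.1, vd.1), vd.2)]) out) []) := rfl
  set keysA := a.foldl (fun (d : PySem.Dict Int (List (Int × Int))) p => d.modify p.1.1 [] (· ++ [(p.1.2, p.2)])) PySem.Dict.empty with hkeysA
  have hfold : keysA
      = (a.map (fun p => (p.1.1, ((p.1.2, p.2) : Int × Int)))).foldl (fun d q => d.modify q.1 [] (· ++ [q.2])) PySem.Dict.empty := by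
    rw [hkeysA, List.foldl_map]
  have hAkeys : keysA.keys = K := by
    rw [hkeysA]
    rw [PySem.Dict.keys_foldl_modify_key a (fun p => p.1.1) [] (fun _ p v => v ++ [(p.1.2, p.2)]) PySem.Dict.empty]
    rw [PySem.Dict.keys_empty, PySem.Set.update_nil_left, hK]
  have hAnodup : keysA.keys.Nodup := hAkeys ▸ hKnodup
  have hAgetD : ∀ k, keysA.getD k [] = (a.filter (fun p => p.1.1 == k)).map (fun p => (p.1.2, p.2)) := by
    intro k
    rw [hfold, PySem.Dict.getD_foldl_modify_append, PySem.Dict.getD_empty]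
    rw [List.filter_map, List.map_map]
    simp [Function.comp_def]
  have hAitems : keysA.items = K.map (fun k => (k, keysA.getD k [])) := by
    rw [PySem.Dict.items_eq_map_keys keysA hAnodup [], hAkeys]
  -- per-key agreement
  have hmin : ∀ k ∈ K, pvMinInner (keysA.getD k []) = [(mins.getD k 0, 1)] := by
    intro k hk
    rw [hAgetD, pvMinInner_eq, List.map_map]
    have h3 : ((a.filter (fun p => p.1.1 == k)).map ((·.1) ∘ fun p => (p.1.2, p.2))) = (a.filter (fun p => p.1.1 == k)).map (fun p => p.1.2) := by
      simp [Function.comp_def]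
    rw [h3, ← hBget, hBsome k hk]
    rfl
  -- the output list
  have hout : keysA.items.foldl (fun out kv => (pvMinInner kv.2).foldl (fun out vd => out ++ [((kv.1, vd.1), vd.2)]) out) []
      = K.map (fun k => ((k, mins.getD k 0), 1)) := by
    rw [out_fold, List.nil_append, hAitems, List.flatMap_map]
    exact flatMap_singleton_eq_map K _ _ (fun k hk => by
      simp only [hmin k hk, List.map_cons, List.map_nil])
  rw [hA, hout]
  -- consolidation is the identity here
  have hnodup1 : ((K.map (fun k => ((k, mins.getD k 0), (1:Int)))).map (·.1)).Nodup := by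
    rw [List.map_map]
    exact hKnodup.map (fun x y h => congrArg Prod.fst h)
  have hcons : pvConsolidate (K.map (fun k => ((k, mins.getD k 0), (1:Int))))
      = K.map (fun k => ((k, mins.getD k 0), (1:Int))) := by
    show ((K.map (fun k => ((k, mins.getD k 0), (1:Int)))).foldl
        (fun (d : PySem.Dict (Int × Int) Int) p => d.insert p.1 (d.getD p.1 0 + p.2)) PySem.Dict.empty).items.filter
        (fun p => p.2 != 0) = _
    rw [consolidate_fold _ _ hnodup1 (fun p _ => PySem.Dict.contains_empty p.1)]
    rw [show (PySem.Dict.empty : PySem.Dict (Int × Int) Int).items = [] from rfl, List.nil_append]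
    apply List.filter_eq_self.2
    intro p hp
    rw [List.mem_map] at hp; obtain ⟨k, _, rfl⟩ := hp; rfl
  rw [hcons, halt, hBitems, List.map_map]
  rfl

-- ===== VERDICT (by name: the statement is the Claim_ definition above) =====
theorem collection_min_spec : Claim_equal_collection_min := by
  intro a _ _
  exact (pv_main a).symm ▸ rfl
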